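-- pv_equiv track=rewrite | github.com/DalasNoin/cot_monitoring_environment | src/preference_text_game/create_preference_breakdown.py | clean_preference
-- ===== SOURCE A (Python) =====
-- def clean_preference(pref: str) -> str:
--     """Standardize preference names."""
--     if not pref or pref == 'Unknown':
--         return 'Unknown'
--
--     pref_lower = pref.lower()
--
--     # Check for "No Preference" / Neither / Quit FIRST (most important for unpleasant tasks)
--     if any(word in pref_lower for word in ['preference', 'neither', 'quit', 'refuse', 'decline', 'none']):
--         return 'Refused/Neither'
--
--     # Regular categories
--     elif 'creative' in pref_lower:
--         return 'Creative'
--     elif 'repetitive' in pref_lower: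
--         return 'Repetitive'
--     elif 'analytical' in pref_lower:
--         return 'Analytical'
--     elif 'social' in pref_lower or 'interpersonal' in pref_lower:
--         return 'Social'
--     elif 'technical' in pref_lower or 'systematic' in pref_lower:
--         return 'Technical'
--     elif 'emotional' in pref_lower or 'support' in pref_lower:
--         return 'Emotional Support'
--     elif 'community' in pref_lower or 'building' in pref_lower:
--         return 'Community'
--     elif 'teaching' in pref_lower or 'mentoring' in pref_lower:
--         return 'Teaching'
--     elif 'advocacy' in pref_lower or 'persuasion' in pref_lower:
--         return 'Advocacy'
--
--     # Unpleasant-for-LLM categories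
--     elif 'extreme' in pref_lower or 'constraint' in pref_lower or 'fibonacci' in pref_lower:
--         return 'Extreme Constrained'
--     elif 'zalgo' in pref_lower and 'repetitive' in pref_lower:
--         return 'Zalgo Repetitive'
--     elif 'zalgo' in pref_lower or 'corruption' in pref_lower or 'corrupted' in pref_lower:
--         return 'Zalgo Corruption'
--     elif 'anti' in pref_lower or 'coherent' in pref_lower or 'contradiction' in pref_lower:
--         return 'Anti-Coherent'
--     elif 'unnatural' in pref_lower or 'divergence' in pref_lower or 'alphabetical' in pref_lower:
--         return 'Unnatural Text'
--     else:
--         return 'Other'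
-- ===== SOURCE B (Python) =====
-- # B: instead of an ordered first-match if/elif chain, classify by a flat keyword ->
-- # (priority, category) map scanned in ALPHABETICAL keyword order, keeping the matched
-- # keyword of minimum priority; ties share a category, so iteration order is irrelevant,
-- # and A's unreachable 'zalgo'+'repetitive' compound rule is dropped as provably subsumed.
--
-- _KEYWORDS = {
--     'advocacy': (9, 'Advocacy'),
--     'alphabetical': (14, 'Unnatural Text'),
--     'analytical': (3, 'Analytical'),
--     'anti': (13, 'Anti-Coherent'),
--     'building': (7, 'Community'),
--     'coherent': (13, 'Anti-Coherent'),
--     'community': (7, 'Community'),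
--     'constraint': (10, 'Extreme Constrained'),
--     'contradiction': (13, 'Anti-Coherent'),
--     'corrupted': (12, 'Zalgo Corruption'),
--     'corruption': (12, 'Zalgo Corruption'),
--     'creative': (1, 'Creative'),
--     'decline': (0, 'Refused/Neither'),
--     'divergence': (14, 'Unnatural Text'),
--     'emotional': (6, 'Emotional Support'),
--     'extreme': (10, 'Extreme Constrained'),
--     'fibonacci': (10, 'Extreme Constrained'),
--     'interpersonal': (4, 'Social'),
--     'mentoring': (8, 'Teaching'),
--     'neither': (0, 'Refused/Neither'),
--     'none': (0, 'Refused/Neither'),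
--     'persuasion': (9, 'Advocacy'),
--     'preference': (0, 'Refused/Neither'),
--     'quit': (0, 'Refused/Neither'),
--     'refuse': (0, 'Refused/Neither'),
--     'repetitive': (2, 'Repetitive'),
--     'social': (4, 'Social'),
--     'support': (6, 'Emotional Support'),
--     'systematic': (5, 'Technical'),
--     'teaching': (8, 'Teaching'),
--     'technical': (5, 'Technical'),
--     'unnatural': (14, 'Unnatural Text'),
--     'zalgo': (12, 'Zalgo Corruption'),
-- }
--
--
-- def clean_preference(pref: str) -> str:
--     """Standardize preference names."""
--     if not pref or pref == 'Unknown':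
--         return 'Unknown'
--     s = pref.lower()
--     best = None
--     for kw, (pri, cat) in _KEYWORDS.items():
--         if kw in s and (best is None or pri < best[0]):
--             best = (pri, cat)
--     return best[1] if best is not None else 'Other'
-- ===== Notes on version B (the rewrite author's own statement) =====
-- stated objective: alternative
-- what changed: Replaced the priority-ordered first-match if/elif chain by a flat keyword->(priority,category) map scanned in alphabetical order, returning the category of the minimum-priority matched keyword; A's one unreachable compound rule is dropped as provably subsumed, and the proof shows iteration order does not matter.
import Mathlib
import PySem

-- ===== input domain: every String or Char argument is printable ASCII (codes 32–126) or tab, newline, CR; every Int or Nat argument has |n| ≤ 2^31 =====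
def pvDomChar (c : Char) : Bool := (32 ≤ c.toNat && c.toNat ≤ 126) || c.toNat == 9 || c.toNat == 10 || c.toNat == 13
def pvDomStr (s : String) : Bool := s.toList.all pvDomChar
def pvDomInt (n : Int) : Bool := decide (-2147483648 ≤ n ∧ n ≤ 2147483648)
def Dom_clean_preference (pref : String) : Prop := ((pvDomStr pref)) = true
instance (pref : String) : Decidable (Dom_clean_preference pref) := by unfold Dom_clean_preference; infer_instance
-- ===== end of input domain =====

-- B replaces A's ordered if/elif chain by a flat keyword → (priority, category) map scanned in
-- alphabetical order keeping the minimum-priority match (A's dead 'zalgo'+'repetitive' rule dropped);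
-- alternative decomposition, same cost.

-- ===== PORT A =====
def clean_preference (pref : String) : String :=
  if pref == "" || pref == "Unknown" then "Unknown"
  else
    let pref_lower := PySem.Str.lower pref
    if (["preference", "neither", "quit", "refuse", "decline", "none"]).any
        (fun word => PySem.Str.isIn word pref_lower) then "Refused/Neither"
    else if PySem.Str.isIn "creative" pref_lower then "Creative"
    else if PySem.Str.isIn "repetitive" pref_lower then "Repetitive"
    else if PySem.Str.isIn "analytical" pref_lower then "Analytical"
    else if PySem.Str.isIn "social" pref_lower || PySem.Str.isIn "interpersonal" pref_lower then "Social"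
    else if PySem.Str.isIn "technical" pref_lower || PySem.Str.isIn "systematic" pref_lower then "Technical"
    else if PySem.Str.isIn "emotional" pref_lower || PySem.Str.isIn "support" pref_lower then "Emotional Support"
    else if PySem.Str.isIn "community" pref_lower || PySem.Str.isIn "building" pref_lower then "Community"
    else if PySem.Str.isIn "teaching" pref_lower || PySem.Str.isIn "mentoring" pref_lower then "Teaching"
    else if PySem.Str.isIn "advocacy" pref_lower || PySem.Str.isIn "persuasion" pref_lower then "Advocacy"
    else if PySem.Str.isIn "extreme" pref_lower || PySem.Str.isIn "constraint" pref_lower || PySem.Str.isIn "fibonacci" pref_lower then "Extreme Constrained"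
    else if PySem.Str.isIn "zalgo" pref_lower && PySem.Str.isIn "repetitive" pref_lower then "Zalgo Repetitive"
    else if PySem.Str.isIn "zalgo" pref_lower || PySem.Str.isIn "corruption" pref_lower || PySem.Str.isIn "corrupted" pref_lower then "Zalgo Corruption"
    else if PySem.Str.isIn "anti" pref_lower || PySem.Str.isIn "coherent" pref_lower || PySem.Str.isIn "contradiction" pref_lower then "Anti-Coherent"
    else if PySem.Str.isIn "unnatural" pref_lower || PySem.Str.isIn "divergence" pref_lower || PySem.Str.isIn "alphabetical" pref_lower then "Unnatural Text"
    else "Other"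

-- ===== PORT B =====
-- Source B's _KEYWORDS dict: keyword → (priority, category), in alphabetical (insertion) order
def cleanKeywords : List (String × Int × String) :=
  [ ("advocacy", 9, "Advocacy"),
    ("alphabetical", 14, "Unnatural Text"),
    ("analytical", 3, "Analytical"),
    ("anti", 13, "Anti-Coherent"),
    ("building", 7, "Community"),
    ("coherent", 13, "Anti-Coherent"),
    ("community", 7, "Community"),
    ("constraint", 10, "Extreme Constrained"),
    ("contradiction", 13, "Anti-Coherent"),
    ("corrupted", 12, "Zalgo Corruption"),
    ("corruption", 12, "Zalgo Corruption"),
    ("creative", 1, "Creative"),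
    ("decline", 0, "Refused/Neither"),
    ("divergence", 14, "Unnatural Text"),
    ("emotional", 6, "Emotional Support"),
    ("extreme", 10, "Extreme Constrained"),
    ("fibonacci", 10, "Extreme Constrained"),
    ("interpersonal", 4, "Social"),
    ("mentoring", 8, "Teaching"),
    ("neither", 0, "Refused/Neither"),
    ("none", 0, "Refused/Neither"),
    ("persuasion", 9, "Advocacy"),
    ("preference", 0, "Refused/Neither"),
    ("quit", 0, "Refused/Neither"),
    ("refuse", 0, "Refused/Neither"),
    ("repetitive", 2, "Repetitive"),
    ("social", 4, "Social"),
    ("support", 6, "Emotional Support"),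
    ("systematic", 5, "Technical"),
    ("teaching", 8, "Teaching"),
    ("technical", 5, "Technical"),
    ("unnatural", 14, "Unnatural Text"),
    ("zalgo", 12, "Zalgo Corruption") ]

-- the loop body of Source B: keep the matched keyword of strictly smaller priority
def cleanStep (s : String) (best : Option (Int × String)) (e : String × Int × String) :
    Option (Int × String) :=
  if PySem.Str.isIn e.1 s &&
      (match best with | none => true | some (p, _) => decide (e.2.1 < p)) then
    some e.2
  else best

def clean_preference_alt (pref : String) : String :=
  if pref == "" || pref == "Unknown" then "Unknown"
  else
    let s := PySem.Str.lower pref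
    match cleanKeywords.foldl (cleanStep s) none with
    | some (_, cat) => cat
    | none => "Other"

-- ===== PRECONDITION & SPEC =====
def Spec_clean_preference (pref : String) (out : String) : Prop := out = clean_preference_alt pref
instance (pref : String) (out : String) : Decidable (Spec_clean_preference pref out) := by unfold Spec_clean_preference; infer_instance

-- ===== CLAIM (what is proved, stated in full; the proofs are below) =====
def Claim_equal_clean_preference : Prop := ∀ (pref : String), Dom_clean_preference pref → Spec_clean_preference pref (clean_preference pref)

-- ===== LEMMAS AND PROOFS =====

-- the same keywords rearranged into priority (= A's rule) order
def cleanKeywordsPri : List (String × Int × String) :=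
  [ ("preference", 0, "Refused/Neither"),
    ("neither", 0, "Refused/Neither"),
    ("quit", 0, "Refused/Neither"),
    ("refuse", 0, "Refused/Neither"),
    ("decline", 0, "Refused/Neither"),
    ("none", 0, "Refused/Neither"),
    ("creative", 1, "Creative"),
    ("repetitive", 2, "Repetitive"),
    ("analytical", 3, "Analytical"),
    ("social", 4, "Social"),
    ("interpersonal", 4, "Social"),
    ("technical", 5, "Technical"),
    ("systematic", 5, "Technical"),
    ("emotional", 6, "Emotional Support"),
    ("support", 6, "Emotional Support"),
    ("community", 7, "Community"),
    ("building", 7, "Community"),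
    ("teaching", 8, "Teaching"),
    ("mentoring", 8, "Teaching"),
    ("advocacy", 9, "Advocacy"),
    ("persuasion", 9, "Advocacy"),
    ("extreme", 10, "Extreme Constrained"),
    ("constraint", 10, "Extreme Constrained"),
    ("fibonacci", 10, "Extreme Constrained"),
    ("zalgo", 12, "Zalgo Corruption"),
    ("corruption", 12, "Zalgo Corruption"),
    ("corrupted", 12, "Zalgo Corruption"),
    ("anti", 13, "Anti-Coherent"),
    ("coherent", 13, "Anti-Coherent"),
    ("contradiction", 13, "Anti-Coherent"),
    ("unnatural", 14, "Unnatural Text"),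
    ("divergence", 14, "Unnatural Text"),
    ("alphabetical", 14, "Unnatural Text") ]

lemma cleanKeywords_perm : cleanKeywords.Perm cleanKeywordsPri := by decide

-- keywords of equal priority carry the same (priority, category) payload
lemma cleanKeywords_tie :
    ∀ x ∈ cleanKeywords, ∀ y ∈ cleanKeywords, x.2.1 = y.2.1 → x.2 = y.2 := by decide

-- the loop body commutes on entries whose priority ties share a payload
lemma cleanStep_comm (s : String) (x y : String × Int × String)
    (h : x.2.1 = y.2.1 → x.2 = y.2) (z : Option (Int × String)) :
    cleanStep s (cleanStep s z x) y = cleanStep s (cleanStep s z y) x := by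
  obtain ⟨kx, px, cx⟩ := x
  obtain ⟨ky, py, cy⟩ := y
  simp only at h
  rcases z with _ | ⟨p, c⟩ <;>
    simp only [cleanStep] <;>
    by_cases hx : PySem.Str.isIn kx s <;>
    by_cases hy : PySem.Str.isIn ky s <;>
    simp only [hx, hy, Bool.true_and, Bool.false_and, Bool.and_true, Bool.and_false,
      Bool.false_eq_true, if_false, if_true] <;>
    simp <;>
    rcases lt_trichotomy px py with hp | hp | hp <;>
    first
      | (simp [hp, not_lt.mpr hp.le, h hp]; omega)
      | (simp_all; omega)
      | (split_ifs <;> simp_all <;> omega)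

-- once the accumulator holds a priority no later entry beats, the fold is constant
lemma cleanStep_absorb (s : String) (p : Int) (c : String) :
    ∀ (L : List (String × Int × String)), (∀ e ∈ L, ¬ e.2.1 < p) →
      L.foldl (cleanStep s) (some (p, c)) = some (p, c) := by
  intro L
  induction L with
  | nil => intro _; rfl
  | cons e L ih =>
      intro h
      have he : ¬ e.2.1 < p := h e (List.mem_cons_self ..)
      have : cleanStep s (some (p, c)) e = some (p, c) := by
        simp [cleanStep, he]
      simp only [List.foldl_cons, this]
      exact ih fun e' he' => h e' (List.mem_cons_of_mem _ he')

-- first matching entry of a priority-ordered list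
def firstM : List (String × Int × String) → String → String
  | [], _ => "Other"
  | e :: r, s => if PySem.Str.isIn e.1 s then e.2.2 else firstM r s

-- on a list sorted by priority, the minimum-priority fold is the first match
lemma fold_pri_eq_first (s : String) :
    ∀ (L : List (String × Int × String)), L.Pairwise (fun a b => a.2.1 ≤ b.2.1) →
      (match L.foldl (cleanStep s) none with
        | some (_, cat) => cat
        | none => "Other") = firstM L s := by
  intro L
  induction L with
  | nil => intro _; rfl
  | cons e L ih =>
      intro h
      rw [List.pairwise_cons] at h
      by_cases hm : PySem.Str.isIn e.1 s
      · have h1 : cleanStep s none e = some e.2 := by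
          simp only [cleanStep, hm, Bool.true_and, Bool.and_true, if_true]
        have h2 : L.foldl (cleanStep s) (some e.2) = some e.2 :=
          cleanStep_absorb s e.2.1 e.2.2 L (fun e' he' => not_lt.mpr (h.1 e' he'))
        simp only [List.foldl_cons, h1, firstM, hm, if_true]
        rw [h2]
      · have h1 : cleanStep s none e = none := by
          simp only [cleanStep, hm, Bool.false_and, Bool.false_eq_true, if_false]
        simp only [List.foldl_cons, h1, firstM, hm, if_false]
        exact ih h.2

-- split a grouped 'or' condition into A's chain's atomic steps
lemma if_orb {α : Type} (a b : Bool) (x y : α) :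
    (if a || b then x else y) = if a then x else if b then x else y := by
  cases a <;> simp

theorem clean_preference_eq_alt (pref : String) :
    clean_preference pref = clean_preference_alt pref := by
  unfold clean_preference clean_preference_alt
  by_cases h0 : (pref == "" || pref == "Unknown") = true
  · simp [h0]
  · simp only [h0, if_false, Bool.false_eq_true]
    rw [List.Perm.foldl_eq' cleanKeywords_perm
        (fun x hx y hy z => cleanStep_comm (PySem.Str.lower pref) x y
          (cleanKeywords_tie x hx y hy) z) none]
    rw [fold_pri_eq_first (PySem.Str.lower pref) cleanKeywordsPri (by decide)]
    by_cases hrp : PySem.Str.isIn "repetitive" (PySem.Str.lower pref)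
    · simp only [firstM, cleanKeywordsPri, List.any, hrp, Bool.or_true, Bool.true_or,
        Bool.and_true, Bool.and_false, if_orb, if_true, Bool.or_false]
    · simp only [firstM, cleanKeywordsPri, List.any, hrp, Bool.or_false,
        Bool.and_false, Bool.false_eq_true, if_false, if_orb]

-- ===== VERDICT (by name: the statement is the Claim_ definition above) =====
theorem clean_preference_spec : Claim_equal_clean_preference := by
  intro pref _
  unfold Spec_clean_preference
  exact clean_preference_eq_alt pref
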